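-- pv_equiv track=rewrite | github.com/raykennedy777/motogp_muxing | watermark_detection_canal.py | find_breaks
-- ===== SOURCE A (Python) =====
-- def find_breaks(results, min_break_frames=10):
--     """
--     Analyze scan results to find ad breaks.
--     Returns list of (break_start_frame, break_end_frame) tuples.
--     """
--     breaks = []
--     in_break = False
--     break_start = None
--
--     for i, (frame, time_sec, canal_p, mgp_p, canal_b, mgp_b) in enumerate(results):
--         if not canal_p and not in_break:
--             # Canal+ logo disappeared -> potential break start
--             in_break = True
--             break_start = frame
--         elif canal_p and in_break:
--             # Canal+ logo reappeared -> break end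
--             break_end = frame
--             duration_frames = break_end - break_start
--             if duration_frames >= min_break_frames:
--                 breaks.append((break_start, break_end))
--             in_break = False
--
--     # Handle break still open at end
--     if in_break and break_start is not None:
--         break_end = results[-1][0]
--         duration_frames = break_end - break_start
--         if duration_frames >= min_break_frames:
--             breaks.append((break_start, break_end))
--
--     return breaks
-- ===== SOURCE B (Python) =====
-- def find_breaks(results, min_break_frames=10):
--     """
--     Analyze scan results to find ad breaks.
--     Returns list of (break_start_frame, break_end_frame) tuples.
--     Staged transition-detection version: compare each element's Canal+
--     flag with its predecessor's to collect the disappearance frames and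
--     the reappearance frames as two lists, pad a trailing open break with
--     the last frame, then zip the lists and keep the long-enough spans.
--     """
--     frames = [r[0] for r in results]
--     pres = [bool(r[2]) for r in results]
--     prev = [True] + pres
--     starts = [f for f, p, q in zip(frames, pres, prev) if not p and q]
--     ends = [f for f, p, q in zip(frames, pres, prev) if p and not q]
--     if len(starts) > len(ends):
--         ends = ends + [frames[-1]]
--     return [(s, e) for s, e in zip(starts, ends) if e - s >= min_break_frames]
-- ===== Notes on version B (the rewrite author's own statement) =====
-- stated objective: simpler
-- what changed: Replaced A's single-pass in_break/break_start state machine with post-loop fixup by staged passes: detect flag transitions against each element's predecessor, collect disappearance frames and reappearance frames as two separate lists, pad a trailing open break with the last frame, then zip the two lists and keep the spans meeting the threshold.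
import Mathlib
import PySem

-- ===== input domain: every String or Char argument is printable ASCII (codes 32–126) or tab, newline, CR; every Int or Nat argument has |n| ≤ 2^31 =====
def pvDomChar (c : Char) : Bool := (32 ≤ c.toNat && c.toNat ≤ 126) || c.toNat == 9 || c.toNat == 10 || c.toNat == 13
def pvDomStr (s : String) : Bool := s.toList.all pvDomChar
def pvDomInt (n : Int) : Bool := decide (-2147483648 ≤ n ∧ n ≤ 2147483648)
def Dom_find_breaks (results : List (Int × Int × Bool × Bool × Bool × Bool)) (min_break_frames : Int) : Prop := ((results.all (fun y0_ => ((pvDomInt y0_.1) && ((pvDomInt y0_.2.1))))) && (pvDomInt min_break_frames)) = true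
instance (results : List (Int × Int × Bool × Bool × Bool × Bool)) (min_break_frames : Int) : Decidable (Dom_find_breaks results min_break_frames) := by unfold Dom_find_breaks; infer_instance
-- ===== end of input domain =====

-- B replaces A's single-pass in_break/break_start state machine (plus post-loop
-- open-break fixup) by staged passes: detect flag transitions against each
-- element's predecessor, collect disappearance and reappearance frames as two
-- lists, pad a trailing open break with the last frame, zip and filter; objective: simpler.

-- ===== PORT A =====
-- loop body of A: state = (breaks, in_break, break_start); break_start is carried as an
-- Int (initial 0 stands for Python's None, which A never reads before overwriting it)
def pvStepA (min_break_frames : Int)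
    (st : List (Int × Int) × Bool × Int) (r : Int × Int × Bool × Bool × Bool × Bool) :
    List (Int × Int) × Bool × Int :=
  let breaks := st.1
  let in_break := st.2.1
  let break_start := st.2.2
  let frame := r.1
  let canal_p := r.2.2.1
  if !canal_p && !in_break then
    (breaks, true, frame)
  else if canal_p && in_break then
    let break_end := frame
    if break_end - break_start ≥ min_break_frames then
      (breaks ++ [(break_start, break_end)], false, break_start)
    else (breaks, false, break_start)
  else st

def find_breaks (results : List (Int × Int × Bool × Bool × Bool × Bool)) (min_break_frames : Int) : List (Int × Int) :=
  let st := results.foldl (pvStepA min_break_frames) ([], false, 0)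
  -- 'if in_break and break_start is not None:' — break_start is never None once in_break holds
  if st.2.1 then
    match PySem.List.pyGet? results (-1) with   -- results[-1]; none (IndexError) is unreachable here
    | some r => if r.1 - st.2.2 ≥ min_break_frames then st.1 ++ [(st.2.2, r.1)] else st.1
    | none => st.1
  else st.1

-- ===== PORT B =====
def find_breaks_alt (results : List (Int × Int × Bool × Bool × Bool × Bool)) (min_break_frames : Int) : List (Int × Int) :=
  let frames := results.map (fun r => r.1)
  let pres := results.map (fun r => r.2.2.1)
  let prev := true :: pres                       -- prev = [True] + pres (zip truncates like Python's)
  let starts := ((frames.zip (pres.zip prev)).filter (fun t => !t.2.1 && t.2.2)).map (fun t => t.1)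
  let ends0 := ((frames.zip (pres.zip prev)).filter (fun t => t.2.1 && !t.2.2)).map (fun t => t.1)
  let ends :=
    if ends0.length < starts.length then
      match PySem.List.pyGet? frames (-1) with   -- frames[-1]; only reached when starts ≠ [], so frames ≠ []
      | some lf => ends0 ++ [lf]
      | none => ends0
    else ends0
  (starts.zip ends).filter (fun se => decide (se.2 - se.1 ≥ min_break_frames))

-- ===== PRECONDITION & SPEC =====
def Spec_find_breaks (results : List (Int × Int × Bool × Bool × Bool × Bool)) (min_break_frames : Int) (out : List (Int × Int)) : Prop := out = find_breaks_alt results min_break_frames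
instance (results : List (Int × Int × Bool × Bool × Bool × Bool)) (min_break_frames : Int) (out : List (Int × Int)) : Decidable (Spec_find_breaks results min_break_frames out) := by unfold Spec_find_breaks; infer_instance

-- ===== CLAIM (what is proved, stated in full; the proofs are below) =====
def Claim_equal_find_breaks : Prop := ∀ (results : List (Int × Int × Bool × Bool × Bool × Bool)) (min_break_frames : Int), Dom_find_breaks results min_break_frames → Spec_find_breaks results min_break_frames (find_breaks results min_break_frames)

-- ===== LEMMAS AND PROOFS =====

-- A's post-loop open-break handling, with results[-1][0] abstracted as last_frame
def pvFin (last_frame min_break_frames : Int) (st : List (Int × Int) × Bool × Int) : List (Int × Int) :=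
  if st.2.1 then
    if last_frame - st.2.2 ≥ min_break_frames then st.1 ++ [(st.2.2, last_frame)] else st.1
  else st.1

-- the (starts, ends) transition lists of B, as one recursion carrying the previous flag q
def pvG : Bool → List (Int × Int × Bool × Bool × Bool × Bool) → List Int × List Int
  | _, [] => ([], [])
  | q, r :: rest =>
    let se := pvG r.2.2.1 rest
    ((if !r.2.2.1 && q then r.1 :: se.1 else se.1),
     (if r.2.2.1 && !q then r.1 :: se.2 else se.2))

-- B's final assembly: pad a trailing open break with last_frame, zip, filter
def pvAsm (last_frame mbf : Int) (S E : List Int) : List (Int × Int) :=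
  let E' := if E.length < S.length then E ++ [last_frame] else E
  (S.zip E').filter (fun se => decide (se.2 - se.1 ≥ mbf))

theorem pvAsm_cons (last mbf s e : Int) (S E : List Int) :
    pvAsm last mbf (s :: S) (e :: E) =
      (if e - s ≥ mbf then [(s, e)] else []) ++ pvAsm last mbf S E := by
  simp only [pvAsm, List.length_cons, Nat.add_lt_add_iff_right]
  split_ifs with h h2 h2 <;> simp [List.zip_cons_cons, h2]

-- B's comprehensions compute pvG
theorem pvGchar (l : List (Int × Int × Bool × Bool × Bool × Bool)) : ∀ (q : Bool),
    ((((l.map (fun r => r.1)).zip ((l.map (fun r => r.2.2.1)).zip (q :: l.map (fun r => r.2.2.1)))).filter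
        (fun t => !t.2.1 && t.2.2)).map (fun t => t.1) = (pvG q l).1)
  ∧ ((((l.map (fun r => r.1)).zip ((l.map (fun r => r.2.2.1)).zip (q :: l.map (fun r => r.2.2.1)))).filter
        (fun t => t.2.1 && !t.2.2)).map (fun t => t.1) = (pvG q l).2) := by
  induction l with
  | nil => intro q; simp [pvG]
  | cons r rest ih =>
    intro q
    have h1 := (ih r.2.2.1).1
    have h2 := (ih r.2.2.1).2
    simp only [List.map_cons, List.zip_cons_cons, List.filter_cons, pvG]
    constructor
    · by_cases hc : (!r.2.2.1 && q) = true <;> simp [hc, h1]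
    · by_cases hc : (r.2.2.1 && !q) = true <;> simp [hc, h2]

-- the loop invariant: A's fold (then post-loop fixup) produces B's assembled output
theorem pvKey (last mbf : Int) (l : List (Int × Int × Bool × Bool × Bool × Bool)) :
    (∀ bks s0, pvFin last mbf (l.foldl (pvStepA mbf) (bks, false, s0)) =
        bks ++ pvAsm last mbf (pvG true l).1 (pvG true l).2)
  ∧ (∀ bks start, pvFin last mbf (l.foldl (pvStepA mbf) (bks, true, start)) =
        bks ++ pvAsm last mbf (start :: (pvG false l).1) (pvG false l).2) := by
  induction l with
  | nil =>
    constructor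
    · intro bks s0; simp [pvFin, pvG, pvAsm]
    · intro bks start
      simp only [List.foldl_nil, pvFin, pvG, pvAsm]
      split_ifs <;> simp_all [List.zip_cons_cons]
  | cons r rest ih =>
    constructor
    · intro bks s0
      by_cases hc : r.2.2.1 = true
      · have hstep : pvStepA mbf (bks, false, s0) r = (bks, false, s0) := by
          simp [pvStepA, hc]
        rw [List.foldl_cons, hstep, ih.1]
        simp [pvG, hc]
      · simp only [Bool.not_eq_true] at hc
        have hstep : pvStepA mbf (bks, false, s0) r = (bks, true, r.1) := by
          simp [pvStepA, hc]
        rw [List.foldl_cons, hstep, ih.2]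
        simp [pvG, hc]
    · intro bks start
      by_cases hc : r.2.2.1 = true
      · by_cases hd : r.1 - start ≥ mbf
        · have hstep : pvStepA mbf (bks, true, start) r = (bks ++ [(start, r.1)], false, start) := by
            simp [pvStepA, hc, hd]
          rw [List.foldl_cons, hstep, ih.1]
          simp [pvG, hc, pvAsm_cons, hd]
        · have hstep : pvStepA mbf (bks, true, start) r = (bks, false, start) := by
            simp [pvStepA, hc, hd]
          rw [List.foldl_cons, hstep, ih.1]
          simp [pvG, hc, pvAsm_cons, hd]
      · simp only [Bool.not_eq_true] at hc
        have hstep : pvStepA mbf (bks, true, start) r = (bks, true, start) := by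
          simp [pvStepA, hc]
        rw [List.foldl_cons, hstep, ih.2]
        simp [pvG, hc]

-- ===== VERDICT (by name: the statement is the Claim_ definition above) =====
theorem find_breaks_spec : Claim_equal_find_breaks := by
  intro results mbf _dom
  unfold Spec_find_breaks find_breaks find_breaks_alt
  cases hlast : PySem.List.pyGet? results (-1) with
  | none =>
    have hnil : results = [] := by
      cases results with
      | nil => rfl
      | cons x xs => simp [PySem.List.pyGet?_neg_one, List.getLast?] at hlast
    subst hnil
    simp
  | some r =>
    have hA := (pvKey r.1 mbf results).1 [] 0
    simp only [List.nil_append] at hA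
    have hframes : PySem.List.pyGet? (results.map (fun x => x.1)) (-1) = some r.1 := by
      simp only [PySem.List.pyGet?_neg_one] at hlast ⊢
      simp [List.getLast?_map, hlast]
    have hS := (pvGchar results true).1
    have hE := (pvGchar results true).2
    simp only [hS, hE, hframes]
    exact hA
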